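-- pv_equiv track=rewrite | github.com/lshwa/Algorithm | 백준/Silver/2346. 풍선 터뜨리기/풍선 터뜨리기.py | solution
-- ===== SOURCE A (Python) =====
-- from collections import deque
--
-- def solution(n, papers):
--     dq = deque((i + 1, papers[i]) for i in range(n))
--     result = []
--
--     while dq:
--         idx, move = dq.popleft()
--         result.append(idx)
--
--         if not dq:
--             break
--
--         if move > 0:
--             dq.rotate(-(move - 1))
--
--         else:
--             dq.rotate(-move)
--
--     return result
-- ===== SOURCE B (Python) =====
-- def solution(n, papers):
--     # order-statistics tree: select and delete the k-th surviving balloon by rank descent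
--     def build(lo, hi):
--         if hi - lo == 1:
--             return (1, lo)
--         mid = (lo + hi) // 2
--         left = build(lo, mid)
--         right = build(mid, hi)
--         return (left[0] + right[0], left, right)
--
--     def select(t, k):
--         # k-th alive leaf (1-based); returns (its position, tree with that leaf removed)
--         if len(t) == 2:
--             return t[1], (0, t[1])
--         cnt, left, right = t
--         if left[0] >= k:
--             p, left2 = select(left, k)
--             return p, (cnt - 1, left2, right)
--         p, right2 = select(right, k - left[0])
--         return p, (cnt - 1, left, right2)
--
--     result = []
--     if n <= 0:
--         return result
--     t = build(0, n)
--     pos = 0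
--     alive = n
--     while True:
--         i, t = select(t, pos + 1)
--         result.append(i + 1)
--         alive -= 1
--         if alive == 0:
--             break
--         move = papers[i]
--         step = move - 1 if move > 0 else move
--         pos = (pos + step) % alive
--     return result
-- ===== Notes on version B (the rewrite author's own statement) =====
-- stated objective: alternative
-- what changed: B replaces the deque-rotation simulation by an order-statistics binary tree: each round it selects and deletes the k-th surviving balloon by rank descent and tracks the cursor as a rank with modular arithmetic, instead of physically rotating the remaining deque by the popped move value.
import Mathlib
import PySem

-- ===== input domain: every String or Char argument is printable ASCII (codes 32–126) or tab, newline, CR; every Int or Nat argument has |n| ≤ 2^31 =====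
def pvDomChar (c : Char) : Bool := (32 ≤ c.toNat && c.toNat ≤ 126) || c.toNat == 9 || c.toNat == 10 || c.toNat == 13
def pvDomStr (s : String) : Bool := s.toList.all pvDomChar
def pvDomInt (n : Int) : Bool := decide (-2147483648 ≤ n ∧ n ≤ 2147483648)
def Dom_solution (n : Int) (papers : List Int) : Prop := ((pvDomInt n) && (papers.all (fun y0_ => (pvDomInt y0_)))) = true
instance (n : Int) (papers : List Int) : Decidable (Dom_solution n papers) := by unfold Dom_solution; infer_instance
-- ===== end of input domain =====

-- B replaces A's deque-rotation simulation by an order-statistics binary tree that selects and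
-- deletes the k-th surviving balloon by rank descent, tracking the cursor as a rank (alternative algorithm).

-- ===== PORT A =====
-- deque.rotate(-k): rotate left by k (k may be negative = rotate right); Python's floor mod gives the shift in [0, len)
def pyRotL (l : List (Int × Int)) (k : Int) : List (Int × Int) :=
  if l.length = 0 then l
  else
    let s := (PySem.Int.mod k l.length).toNat
    l.drop s ++ l.take s

-- the while loop of A; fuel = initial deque length (never exhausted: each step drops one element)
def aLoop : Nat → List (Int × Int) → List Int → List Int
  | _, [], res => res.reverse
  | 0, _ :: _, res => res.reverse
  | f + 1, (idx, move) :: rest, res =>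
    if rest = [] then (idx :: res).reverse
    else aLoop f (pyRotL rest (if move > 0 then move - 1 else move)) (idx :: res)

def solution (n : Int) (papers : List Int) : List Int :=
  -- papers[i]: pyGetD's default is never reached under Pre_solution (n ≤ len papers)
  let dq := (PySem.List.pyRange 0 n 1).map (fun i => (i + 1, PySem.List.pyGetD papers i 0))
  aLoop dq.length dq []

-- ===== PORT B =====
-- Source B's tuple trees: a 2-tuple (cnt, pos) is a leaf, a 3-tuple (cnt, left, right) a node
inductive STree where
  | leaf (cnt : Int) (pos : Int)
  | node (cnt : Int) (l : STree) (r : STree)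
deriving DecidableEq, Repr

def STree.count : STree → Int
  | .leaf c _ => c
  | .node c _ _ => c

-- Source B's build(lo, hi); fuel makes the recursion structural (never exhausted: called with fuel ≥ hi - lo ≥ 1)
def buildT : Nat → Int → Int → STree
  | 0, lo, _ => .leaf 1 lo
  | f + 1, lo, hi =>
    if hi - lo = 1 then .leaf 1 lo
    else
      let mid := PySem.Int.floordiv (lo + hi) 2
      let L := buildT f lo mid
      let R := buildT f mid hi
      .node (L.count + R.count) L R

-- Source B's select(t, k): k-th alive leaf (1-based); returns (its position, tree with that leaf removed)
def selectT : STree → Int → Int × STree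
  | .leaf _ p, _ => (p, .leaf 0 p)
  | .node c l r, k =>
    if l.count ≥ k then
      let pr := selectT l k
      (pr.1, .node (c - 1) pr.2 r)
    else
      let pr := selectT r (k - l.count)
      (pr.1, .node (c - 1) l pr.2)

-- Source B's while loop; fuel = n (never exhausted: the loop breaks after n iterations)
def bLoop (papers : List Int) : Nat → STree → Int → Int → List Int → List Int
  | 0, _, _, _, res => res.reverse
  | f + 1, t, pos, alive, res =>
    let pr := selectT t (pos + 1)
    let res' := (pr.1 + 1) :: res
    let alive' := alive - 1
    if alive' = 0 then res'.reverse
    else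
      let move := PySem.List.pyGetD papers pr.1 0   -- papers[i]; in range under Pre_solution
      let step := if move > 0 then move - 1 else move
      bLoop papers f pr.2 (PySem.Int.mod (pos + step) alive') alive' res'

def solution_alt (n : Int) (papers : List Int) : List Int :=
  if n ≤ 0 then []
  else bLoop papers n.toNat (buildT n.toNat 0 n) 0 n []

-- ===== PRECONDITION & SPEC =====
-- Pre_ excludes exactly the inputs where papers[i] raises IndexError in A (n > len(papers)).
def Pre_solution (n : Int) (papers : List Int) : Prop := n ≤ (papers.length : Int)
instance (n : Int) (papers : List Int) : Decidable (Pre_solution n papers) := by unfold Pre_solution; infer_instance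
def pvWitness_solution : Int × List Int := (3, [3, 2, 1])

def Spec_solution (n : Int) (papers : List Int) (out : List Int) : Prop := out = solution_alt n papers
instance (n : Int) (papers : List Int) (out : List Int) : Decidable (Spec_solution n papers out) := by unfold Spec_solution; infer_instance

-- ===== CLAIM (what is proved, stated in full; the proofs are below) =====
def Claim_equal_solution : Prop := ∀ (n : Int) (papers : List Int), Dom_solution n papers → Pre_solution n papers → Spec_solution n papers (solution n papers)

-- ===== LEMMAS AND PROOFS =====

-- proof-only intermediate model: a cursor over the flat list of alive (index, move) pairs
def cLoop : Nat → List (Int × Int) → Int → List Int → List Int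
  | _, [], _, res => res.reverse
  | 0, _ :: _, _, res => res.reverse
  | f + 1, alive, pos, res =>
    match PySem.List.pop? alive pos with
    | none => res.reverse
    | some ((idx, move), alive') =>
      if alive' = [] then (idx :: res).reverse
      else
        let step := if move > 0 then move - 1 else move
        cLoop f alive' (PySem.Int.mod (pos + step) alive'.length) (idx :: res)

theorem pv_mod_bounds (k : Int) (m : Nat) (hm : 0 < m) :
    0 ≤ PySem.Int.mod k m ∧ PySem.Int.mod k m < m := by
  rw [PySem.Int.mod_eq_emod_of_pos (by exact_mod_cast hm)]
  exact ⟨Int.emod_nonneg _ (by exact_mod_cast hm.ne'), Int.emod_lt_of_pos _ (by exact_mod_cast hm)⟩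

theorem pyRotL_eq_rotate (l : List (Int × Int)) (k : Int) :
    pyRotL l k = l.rotate (PySem.Int.mod k l.length).toNat := by
  unfold pyRotL
  split
  · next h => simp [List.eq_nil_of_length_eq_zero h]
  · next h =>
    have hb := pv_mod_bounds k l.length (Nat.pos_of_ne_zero h)
    rw [List.rotate_eq_drop_append_take (by omega)]

theorem length_pyRotL (l : List (Int × Int)) (k : Int) : (pyRotL l k).length = l.length := by
  rw [pyRotL_eq_rotate]; exact List.length_rotate ..

-- removing the cursor element and re-rotating by the cursor gives A's remaining deque
theorem pv_rest_eq (l : List (Int × Int)) (p : Nat) (hp : p < l.length) :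
    l.drop (p + 1) ++ l.take p = (l.eraseIdx p).rotate p := by
  rw [List.eraseIdx_eq_take_drop_succ]
  have hlen : (l.take p).length = p := by simp; omega
  have hle : p ≤ (l.take p ++ l.drop (p + 1)).length := by simp; omega
  rw [List.rotate_eq_drop_append_take hle]
  rw [List.drop_left' hlen, List.take_left' hlen]

-- mod reduction of the shift: the PySem floor-mod cursor is a faithful rotate index
theorem pv_shift_eq (m : Nat) (hm : 0 < m) (p : Nat) (step : Int) :
    (p + (PySem.Int.mod step m).toNat) % m = (PySem.Int.mod ((p : Int) + step) m).toNat := by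
  have h1 := pv_mod_bounds step m hm
  have h2 := pv_mod_bounds ((p : Int) + step) m hm
  have e1 : PySem.Int.mod step m = step % (m : Int) := PySem.Int.mod_eq_emod_of_pos (by exact_mod_cast hm)
  have e2 : PySem.Int.mod ((p : Int) + step) m = ((p : Int) + step) % (m : Int) :=
    PySem.Int.mod_eq_emod_of_pos (by exact_mod_cast hm)
  have key : (((p + (PySem.Int.mod step m).toNat) % m : Nat) : Int)
      = ((PySem.Int.mod ((p : Int) + step) m).toNat : Int) := by
    push_cast [Int.toNat_of_nonneg h1.1, Int.toNat_of_nonneg h2.1]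
    rw [e1, e2, Int.add_emod (p : Int) (step % (m : Int)),
        Int.emod_emod_of_dvd step (dvd_refl ((m : Int))), ← Int.add_emod]
  exact_mod_cast key

theorem solution_key : ∀ (f : Nat) (alive : List (Int × Int)) (p : Nat) (res : List Int),
    p < alive.length ∨ alive = [] →
    aLoop f (pyRotL alive (p : Int)) res = cLoop f alive (p : Int) res := by
  intro f
  induction f with
  | zero =>
    intro alive p res h
    rcases alive with _ | ⟨x, xs⟩
    · simp [pyRotL, aLoop, cLoop]
    · have hlen : (pyRotL (x :: xs) (p : Int)).length = (x :: xs).length := length_pyRotL ..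
      rcases hrot : pyRotL (x :: xs) (p : Int) with _ | ⟨y, ys⟩
      · rw [hrot] at hlen; simp at hlen
      · simp [aLoop, cLoop]
  | succ f ih =>
    intro alive p res h
    rcases h with hp | rfl
    swap
    · simp [pyRotL, aLoop, cLoop]
    have hlpos : 0 < alive.length := by omega
    have hmodp : PySem.Int.mod (p : Int) alive.length = (p : Int) := by
      rw [PySem.Int.mod_eq_emod_of_pos (by exact_mod_cast hlpos)]
      exact Int.emod_eq_of_lt (by exact_mod_cast Nat.zero_le p) (by exact_mod_cast hp)
    have hrot : pyRotL alive (p : Int) = alive[p] :: (alive.drop (p + 1) ++ alive.take p) := by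
      rw [pyRotL_eq_rotate, hmodp, Int.toNat_natCast,
          List.rotate_eq_drop_append_take (le_of_lt hp), List.drop_eq_getElem_cons hp]
      rfl
    have hpop : PySem.List.pop? alive (p : Int) = some (alive[p], alive.eraseIdx p) :=
      PySem.List.pop?_natCast alive p hp
    rcases hget : alive[p] with ⟨idx, move⟩
    rw [hrot, hget]
    have hblock : cLoop (f + 1) alive (p : Int) res =
        (if alive.eraseIdx p = [] then (idx :: res).reverse
         else cLoop f (alive.eraseIdx p)
           (PySem.Int.mod ((p : Int) + (if move > 0 then move - 1 else move)) (alive.eraseIdx p).length)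
           (idx :: res)) := by
      rcases alive with _ | ⟨x, xs⟩
      · simp at hlpos
      · simp only [cLoop, hpop, hget]
    rw [hblock]
    have herlen : (alive.eraseIdx p).length = alive.length - 1 := by
      rw [List.length_eraseIdx_of_lt hp]
    have hrestlen : (alive.drop (p + 1) ++ alive.take p).length = alive.length - 1 := by
      simp; omega
    by_cases hnil : alive.eraseIdx p = []
    · have : alive.drop (p + 1) ++ alive.take p = [] := by
        apply List.eq_nil_of_length_eq_zero
        rw [hrestlen, ← herlen, hnil]; rfl
      rw [this, if_pos hnil]
      simp [aLoop]
    · have hrestne : alive.drop (p + 1) ++ alive.take p ≠ [] := by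
        intro hc
        apply hnil
        apply List.eq_nil_of_length_eq_zero
        rw [herlen, ← hrestlen, hc]; rfl
      rw [if_neg hnil]
      have haStep : aLoop (f + 1) ((idx, move) :: (alive.drop (p + 1) ++ alive.take p)) res =
          aLoop f (pyRotL (alive.drop (p + 1) ++ alive.take p) (if move > 0 then move - 1 else move)) (idx :: res) := by
        simp only [aLoop, if_neg hrestne]
      rw [haStep]
      have hm : 0 < (alive.eraseIdx p).length := List.length_pos_of_ne_nil hnil
      obtain ⟨hq0, hqlt⟩ := pv_mod_bounds ((p : Int) + (if move > 0 then move - 1 else move))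
        (alive.eraseIdx p).length hm
      have hcast : PySem.Int.mod ((p : Int) + (if move > 0 then move - 1 else move)) (alive.eraseIdx p).length
          = (((PySem.Int.mod ((p : Int) + (if move > 0 then move - 1 else move)) (alive.eraseIdx p).length).toNat : Nat) : Int) := by
        rw [Int.toNat_of_nonneg hq0]
      have hmodq : PySem.Int.mod (((PySem.Int.mod ((p : Int) + (if move > 0 then move - 1 else move)) (alive.eraseIdx p).length).toNat : Nat) : Int) (alive.eraseIdx p).length
          = (((PySem.Int.mod ((p : Int) + (if move > 0 then move - 1 else move)) (alive.eraseIdx p).length).toNat : Nat) : Int) := by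
        rw [PySem.Int.mod_eq_emod_of_pos (by exact_mod_cast hm)]
        apply Int.emod_eq_of_lt
        · exact_mod_cast Nat.zero_le _
        · exact_mod_cast (by omega : (PySem.Int.mod ((p : Int) + (if move > 0 then move - 1 else move)) (alive.eraseIdx p).length).toNat < (alive.eraseIdx p).length)
      have hkey : pyRotL (alive.drop (p + 1) ++ alive.take p) (if move > 0 then move - 1 else move)
          = pyRotL (alive.eraseIdx p) (((PySem.Int.mod ((p : Int) + (if move > 0 then move - 1 else move)) (alive.eraseIdx p).length).toNat : Nat) : Int) := by
        rw [pv_rest_eq alive p hp, pyRotL_eq_rotate, pyRotL_eq_rotate, List.length_rotate,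
            List.rotate_rotate, hmodq, Int.toNat_natCast]
        conv_lhs => rw [← List.rotate_mod]
        rw [pv_shift_eq (alive.eraseIdx p).length hm p (if move > 0 then move - 1 else move)]
      rw [hkey, hcast]
      apply ih
      left
      omega

-- pyRotL by 0 is the identity (used to start the induction)
theorem pyRotL_zero (l : List (Int × Int)) : pyRotL l ((0 : Nat) : Int) = l := by
  rcases l with _ | ⟨x, xs⟩
  · rfl
  · rw [pyRotL_eq_rotate]
    have : PySem.Int.mod ((0 : Nat) : Int) (x :: xs).length = 0 := by
      rw [PySem.Int.mod_eq_emod_of_pos (by simp)]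
      simp
    rw [this]
    simp

-- ===== tree semantics: the list of alive positions represented by an STree =====
def STree.aliveL : STree → List Int
  | .leaf c p => if c = 1 then [p] else []
  | .node _ l r => l.aliveL ++ r.aliveL

def STree.good : STree → Prop
  | .leaf c _ => c = 0 ∨ c = 1
  | .node c l r => c = l.count + r.count ∧ l.good ∧ r.good

theorem count_eq_len : ∀ (t : STree), t.good → t.count = (t.aliveL.length : Int)
  | .leaf c p, hg => by
    rcases hg with h | h <;> simp [STree.count, STree.aliveL, h]
  | .node c l r, hg => by
    obtain ⟨hc, hl, hr⟩ := hg
    simp only [STree.count, STree.aliveL, List.length_append]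
    rw [hc, count_eq_len l hl, count_eq_len r hr]
    push_cast
    ring

theorem selectT_spec : ∀ (t : STree) (k : Int), t.good → 1 ≤ k → k ≤ t.count →
    ∃ hk : (k - 1).toNat < t.aliveL.length,
      (selectT t k).1 = t.aliveL[(k - 1).toNat] ∧
      (selectT t k).2.aliveL = t.aliveL.eraseIdx (k - 1).toNat ∧
      (selectT t k).2.good ∧ (selectT t k).2.count = t.count - 1
  | .leaf c p, k, hg, h1, h2 => by
    have hc : c = 1 := by rcases hg with h | h <;> simp [STree.count, h] at h2 ⊢ <;> omega
    subst hc
    have hk : k = 1 := by simp [STree.count] at h2; omega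
    subst hk
    exact ⟨by simp [STree.aliveL], by simp [selectT, STree.aliveL],
      by simp [selectT, STree.aliveL], by simp [selectT, STree.good], by simp [selectT, STree.count]⟩
  | .node c l r, k, hg, h1, h2 => by
    obtain ⟨hc, hgl, hgr⟩ := hg
    have hlc := count_eq_len l hgl
    have hrc := count_eq_len r hgr
    by_cases hbr : l.count ≥ k
    · obtain ⟨hk, hv, he, hg', hc'⟩ := selectT_spec l k hgl h1 hbr
      have hsel : selectT (.node c l r) k = ((selectT l k).1, .node (c - 1) (selectT l k).2 r) := by
        simp [selectT, hbr]
      refine ⟨?_, ?_, ?_, ?_, ?_⟩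
      · simp [STree.aliveL]; omega
      · rw [hsel]; simp only [STree.aliveL]
        rw [List.getElem_append_left hk, hv]
      · rw [hsel]; simp only [STree.aliveL]
        rw [List.eraseIdx_append_of_lt_length hk, he]
      · rw [hsel]
        exact ⟨by omega, hg', hgr⟩
      · rw [hsel]; simp only [STree.count]
    · push_neg at hbr
      have h1' : 1 ≤ k - l.count := by omega
      have h2' : k - l.count ≤ r.count := by simp [STree.count] at h2; omega
      obtain ⟨hk, hv, he, hg', hc'⟩ := selectT_spec r (k - l.count) hgr h1' h2'
      have hsel : selectT (.node c l r) k = ((selectT r (k - l.count)).1, .node (c - 1) l (selectT r (k - l.count)).2) := by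
        simp [selectT]; omega
      have hidx : (k - 1).toNat = l.aliveL.length + (k - l.count - 1).toNat := by omega
      have hklt : (k - 1).toNat < (l.aliveL ++ r.aliveL).length := by simp; omega
      refine ⟨by simpa [STree.aliveL] using hklt, ?_, ?_, ?_, ?_⟩
      · rw [hsel]; simp only [STree.aliveL]
        rw [List.getElem_append_right (by omega), hv]
        congr 1; omega
      · rw [hsel]; simp only [STree.aliveL]
        rw [hidx, List.eraseIdx_append_of_length_le (by omega)]
        congr 1
        rw [Nat.add_sub_cancel_left, he]
      · rw [hsel]
        exact ⟨by omega, hgl, hg'⟩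
      · rw [hsel]; simp only [STree.count]

theorem buildT_spec : ∀ (f : Nat) (lo hi : Int), 1 ≤ hi - lo → (hi - lo).toNat ≤ f →
    (buildT f lo hi).good ∧ (buildT f lo hi).aliveL = PySem.List.pyRange lo hi 1 := by
  intro f
  induction f with
  | zero => intro lo hi h1 h2; omega
  | succ f ih =>
    intro lo hi h1 h2
    by_cases hone : hi - lo = 1
    · have : hi = lo + 1 := by omega
      subst this
      simp [buildT, STree.good, STree.aliveL, PySem.List.pyRange_one_singleton]
    · have h2' : 2 ≤ hi - lo := by omega
      have hmid : PySem.Int.floordiv (lo + hi) 2 = (lo + hi) / 2 :=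
        PySem.Int.floordiv_eq_ediv_of_pos (by norm_num)
      have hb1 : 1 ≤ (lo + hi) / 2 - lo := by omega
      have hb2 : 1 ≤ hi - (lo + hi) / 2 := by omega
      have hf1 : ((lo + hi) / 2 - lo).toNat ≤ f := by omega
      have hf2 : (hi - (lo + hi) / 2).toNat ≤ f := by omega
      obtain ⟨hgl, hal⟩ := ih lo ((lo + hi) / 2) hb1 hf1
      obtain ⟨hgr, har⟩ := ih ((lo + hi) / 2) hi hb2 hf2
      have hbuild : buildT (f + 1) lo hi =
          .node ((buildT f lo ((lo + hi) / 2)).count + (buildT f ((lo + hi) / 2) hi).count)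
            (buildT f lo ((lo + hi) / 2)) (buildT f ((lo + hi) / 2) hi) := by
        simp only [buildT, if_neg hone, hmid]
      rw [hbuild]
      refine ⟨⟨rfl, hgl, hgr⟩, ?_⟩
      simp only [STree.aliveL, hal, har]
      exact (PySem.List.pyRange_one_append lo ((lo + hi) / 2) hi (by omega) (by omega)).symm

theorem cLoop_step (f : Nat) (l : List (Int × Int)) (pos : Int) (res : List Int)
    (idx move : Int) (rest : List (Int × Int))
    (hne : l ≠ []) (hpop : PySem.List.pop? l pos = some ((idx, move), rest)) :
    cLoop (f + 1) l pos res =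
      (if rest = [] then (idx :: res).reverse
       else cLoop f rest
         (PySem.Int.mod (pos + (if move > 0 then move - 1 else move)) rest.length) (idx :: res)) := by
  rcases l with _ | ⟨x, xs⟩
  · exact absurd rfl hne
  · simp only [cLoop, hpop]

theorem loop_eq (papers : List Int) : ∀ (f : Nat) (t : STree) (pos : Int) (res : List Int),
    t.good → 1 ≤ t.count → 0 ≤ pos → pos < t.count →
    cLoop f (t.aliveL.map (fun p => (p + 1, PySem.List.pyGetD papers p 0))) pos res
      = bLoop papers f t pos t.count res := by
  intro f
  induction f with
  | zero =>
    intro t pos res hg hcnt h0 hlt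
    rcases h : t.aliveL.map (fun p => (p + 1, PySem.List.pyGetD papers p 0)) with _ | ⟨x, xs⟩ <;>
      simp [cLoop, bLoop]
  | succ f ih =>
    intro t pos res hg hcnt h0 hlt
    have hlen := count_eq_len t hg
    have hlpos : 0 < t.aliveL.length := by omega
    have hplt : pos.toNat < t.aliveL.length := by omega
    have hposc : pos = ((pos.toNat : Nat) : Int) := by omega
    obtain ⟨hk, hv, he, hg', hc'⟩ := selectT_spec t (pos + 1) hg (by omega) (by omega)
    have hkidx : (pos + 1 - 1).toNat = pos.toNat := by omega
    rw [hkidx] at hk he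
    simp only [hkidx] at hv
    have hcl := count_eq_len _ hg'
    have hne : t.aliveL.map (fun p => (p + 1, PySem.List.pyGetD papers p 0)) ≠ [] := by
      intro hc
      rw [List.map_eq_nil_iff.mp hc] at hlpos
      simp at hlpos
    have hmlt : pos.toNat < (t.aliveL.map (fun p => (p + 1, PySem.List.pyGetD papers p 0))).length := by
      simp
      omega
    have hpop : PySem.List.pop? (t.aliveL.map (fun p => (p + 1, PySem.List.pyGetD papers p 0))) pos
        = some ((t.aliveL[pos.toNat] + 1, PySem.List.pyGetD papers (t.aliveL[pos.toNat]) 0),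
            (selectT t (pos + 1)).2.aliveL.map (fun p => (p + 1, PySem.List.pyGetD papers p 0))) := by
      conv_lhs => rw [hposc]
      rw [PySem.List.pop?_natCast _ pos.toNat hmlt]
      rw [List.eraseIdx_map, ← he]
      simp
    rw [cLoop_step f _ pos res _ _ _ hne hpop]
    have hbstep : bLoop papers (f + 1) t pos t.count res =
        (if t.count - 1 = 0 then ((t.aliveL[pos.toNat] + 1) :: res).reverse
         else bLoop papers f (selectT t (pos + 1)).2
            (PySem.Int.mod (pos + (if PySem.List.pyGetD papers (t.aliveL[pos.toNat]) 0 > 0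
                then PySem.List.pyGetD papers (t.aliveL[pos.toNat]) 0 - 1
                else PySem.List.pyGetD papers (t.aliveL[pos.toNat]) 0)) (t.count - 1))
            (t.count - 1) ((t.aliveL[pos.toNat] + 1) :: res)) := by
      simp only [bLoop, hv]
    rw [hbstep]
    have herlen : ((selectT t (pos + 1)).2.aliveL.map (fun p => (p + 1, PySem.List.pyGetD papers p 0))).length
        = (selectT t (pos + 1)).2.aliveL.length := by
      simp
    by_cases hz : t.count - 1 = 0
    · have hnil : (selectT t (pos + 1)).2.aliveL.map (fun p => (p + 1, PySem.List.pyGetD papers p 0)) = [] := by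
        apply List.eq_nil_of_length_eq_zero
        rw [herlen]
        omega
      rw [if_pos hnil, if_pos hz]
    · have hm : 0 < (selectT t (pos + 1)).2.aliveL.length := by omega
      have hnn : (selectT t (pos + 1)).2.aliveL.map (fun p => (p + 1, PySem.List.pyGetD papers p 0)) ≠ [] := by
        intro hc
        rw [List.map_eq_nil_iff.mp hc] at hm
        simp at hm
      rw [if_neg hnn, if_neg hz]
      rw [herlen]
      obtain ⟨hb0, hb1⟩ := pv_mod_bounds
        (pos + (if PySem.List.pyGetD papers (t.aliveL[pos.toNat]) 0 > 0
            then PySem.List.pyGetD papers (t.aliveL[pos.toNat]) 0 - 1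
            else PySem.List.pyGetD papers (t.aliveL[pos.toNat]) 0))
        ((selectT t (pos + 1)).2.aliveL.length) hm
      have harg : ((selectT t (pos + 1)).2.aliveL.length : Int) = t.count - 1 := by omega
      rw [harg]
      have hgoal := ih (selectT t (pos + 1)).2
        (PySem.Int.mod (pos + (if PySem.List.pyGetD papers (t.aliveL[pos.toNat]) 0 > 0
            then PySem.List.pyGetD papers (t.aliveL[pos.toNat]) 0 - 1
            else PySem.List.pyGetD papers (t.aliveL[pos.toNat]) 0)) (t.count - 1))
        ((t.aliveL[pos.toNat] + 1) :: res) hg' (by omega) (by rw [← harg]; exact hb0) (by rw [← harg, hcl]; exact hb1)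
      rw [hc'] at hgoal
      exact hgoal

-- ===== VERDICT (by name: the statement is the Claim_ definition above) =====
theorem solution_spec : Claim_equal_solution := by
  intro n papers _ _
  unfold Spec_solution
  by_cases hn : n <= 0
  . have hA : solution n papers = [] := by
      unfold solution
      simp [PySem.List.pyRange_one_eq_nil hn, aLoop]
    have hB : solution_alt n papers = [] := by
      unfold solution_alt
      rw [if_pos hn]
    rw [hA, hB]
  . push_neg at hn
    obtain ⟨hg, hal⟩ := buildT_spec n.toNat 0 n (by omega) (by omega)
    have hcnt : (buildT n.toNat 0 n).count = n := by
      rw [count_eq_len _ hg, hal, PySem.List.length_pyRange_one]; omega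
    have hlistlen : ((buildT n.toNat 0 n).aliveL.map (fun p => (p + 1, PySem.List.pyGetD papers p 0))).length = n.toNat := by
      simp [hal, PySem.List.length_pyRange_one]
    have hA : solution n papers
        = aLoop ((buildT n.toNat 0 n).aliveL.map (fun p => (p + 1, PySem.List.pyGetD papers p 0))).length
            ((buildT n.toNat 0 n).aliveL.map (fun p => (p + 1, PySem.List.pyGetD papers p 0))) [] := by
      show aLoop ((PySem.List.pyRange 0 n 1).map (fun i => (i + 1, PySem.List.pyGetD papers i 0))).length ((PySem.List.pyRange 0 n 1).map (fun i => (i + 1, PySem.List.pyGetD papers i 0))) [] = _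
      rw [← hal]
    have hB : solution_alt n papers = bLoop papers n.toNat (buildT n.toNat 0 n) 0 n [] := by
      unfold solution_alt
      rw [if_neg (by omega)]
    rw [hA, hB, hlistlen]
    have key2 := loop_eq papers n.toNat (buildT n.toNat 0 n) 0 [] hg (by omega) (by norm_num) (by omega)
    rw [hcnt] at key2
    have key := solution_key n.toNat ((buildT n.toNat 0 n).aliveL.map (fun p => (p + 1, PySem.List.pyGetD papers p 0))) 0 []
      (by left; rw [hlistlen]; omega)
    rw [pyRotL_zero] at key
    simp only [Nat.cast_zero] at key
    rw [key]
    exact key2
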